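-- pv_equiv track=rewrite | github.com/CarlesLlobet/cAES | cAES_masked.py | affineTransformationMask
-- ===== SOURCE A (Python) =====
-- def multiply(v, G):
--     result = []
--     for i in range(len(G[0])):  # this loops through columns of the matrix
--         total = 0
--         for j in range(len(v)):  # this loops through vector coordinates & rows of matrix
--             total ^= int(v[j]) & int(G[j][i])
--         result.append(total)
--     return result
--
-- def affineTransformationMask(byte):
--     # Multiplicaro per la matriu (part lineal de la Affine Transformation)
--
--     # Ara a g1 tenim la inversa multiplicativa V(x)
--     m = [[1, 0, 0, 0, 1, 1, 1, 1],
--          [1, 1, 0, 0, 0, 1, 1, 1],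
--          [1, 1, 1, 0, 0, 0, 1, 1],
--          [1, 1, 1, 1, 0, 0, 0, 1],
--          [1, 1, 1, 1, 1, 0, 0, 0],
--          [0, 1, 1, 1, 1, 1, 0, 0],
--          [0, 0, 1, 1, 1, 1, 1, 0],
--          [0, 0, 0, 1, 1, 1, 1, 1]]
--
--     bitArray = bin(byte).lstrip('0b').zfill(8)
--
--     aux = multiply(bitArray, m)
--     res = int(''.join(str(e) for e in aux), 2)
--     return res
-- ===== SOURCE B (Python) =====
-- def affineTransformationMask(byte):
--     # AES affine linear part as a closed-form byte computation:
--     # XOR of the byte with its left-rotations by 1..4 within 8 bits.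
--     b = byte
--     return (b ^ ((b << 1) | (b >> 7)) ^ ((b << 2) | (b >> 6))
--               ^ ((b << 3) | (b >> 5)) ^ ((b << 4) | (b >> 4))) & 0xFF
-- ===== Notes on version B (the rewrite author's own statement) =====
-- stated objective: faster
-- what changed: Replaces the string-of-bits construction and 8x8 bit-matrix multiply with the closed-form AES affine identity b ^ rotl(b,1) ^ rotl(b,2) ^ rotl(b,3) ^ rotl(b,4) computed with integer shifts and masks.
import Mathlib
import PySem

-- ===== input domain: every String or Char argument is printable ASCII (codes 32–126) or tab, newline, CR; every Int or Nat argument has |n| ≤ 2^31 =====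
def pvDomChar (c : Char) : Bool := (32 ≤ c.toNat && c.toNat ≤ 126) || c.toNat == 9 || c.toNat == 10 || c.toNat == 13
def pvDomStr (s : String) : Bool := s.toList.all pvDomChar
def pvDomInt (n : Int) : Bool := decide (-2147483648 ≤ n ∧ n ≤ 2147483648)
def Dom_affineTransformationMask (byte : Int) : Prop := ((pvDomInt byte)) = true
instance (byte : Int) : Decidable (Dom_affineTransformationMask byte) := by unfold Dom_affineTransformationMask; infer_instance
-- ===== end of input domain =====

-- B replaces A's bit-string/matrix multiply by the closed-form rotate-and-XOR byte formula (constant-factor faster).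

-- ===== PORT A =====
-- multiply(v, G) with v a string of bit characters, G a list of rows of Ints.
-- int(v[j]) is ported with PySem.Int.ofChars?; the .getD 0 defaults are unreachable on Pre_
-- (all indices are produced by range(len(..)) over the fixed 8x8 matrix and an 8-char bit string).
def pvMultiply (v : List Char) (G : List (List Int)) : List Int :=
  (PySem.List.pyRange 0 (((PySem.List.pyGet? G 0).getD []).length : Int) 1).foldl
    (fun result i =>
      result ++ [ (PySem.List.pyRange 0 (v.length : Int) 1).foldl
        (fun total j =>
          PySem.Int.bxor total
            (PySem.Int.band ((PySem.Int.ofChars? [(PySem.List.pyGet? v j).getD ' ']).getD 0)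
              ((PySem.List.pyGet? ((PySem.List.pyGet? G j).getD []) i).getD 0)))
        0 ])
    []

def pvMatM : List (List Int) :=
  [[1, 0, 0, 0, 1, 1, 1, 1],
   [1, 1, 0, 0, 0, 1, 1, 1],
   [1, 1, 1, 0, 0, 0, 1, 1],
   [1, 1, 1, 1, 0, 0, 0, 1],
   [1, 1, 1, 1, 1, 0, 0, 0],
   [0, 1, 1, 1, 1, 1, 0, 0],
   [0, 0, 1, 1, 1, 1, 1, 0],
   [0, 0, 0, 1, 1, 1, 1, 1]]

def affineTransformationMask (byte : Int) : Int :=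
  -- bin(byte) = PySem.Int.toBinChars0b; .lstrip('0b') drops leading chars in {'0','b'} (exact);
  -- .zfill(8) = PySem.Chars.zfill; int(''.join(str(e) for e in aux), 2) via ofCharsBase? (succeeds on Pre_).
  let bitArray := PySem.Chars.zfill
    ((PySem.Int.toBinChars0b byte).dropWhile (fun c => c == '0' || c == 'b')) 8
  let aux := pvMultiply bitArray pvMatM
  (PySem.Int.ofCharsBase? (PySem.Chars.join [] (aux.map PySem.Int.toChars)) 2).getD 0

-- ===== PORT B =====
def affineTransformationMask_alt (byte : Int) : Int :=
  let b := byte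
  PySem.Int.band
    (PySem.Int.bxor (PySem.Int.bxor (PySem.Int.bxor (PySem.Int.bxor b
      (PySem.Int.bor (b <<< 1) (b >>> 7)))
      (PySem.Int.bor (b <<< 2) (b >>> 6)))
      (PySem.Int.bor (b <<< 3) (b >>> 5)))
      (PySem.Int.bor (b <<< 4) (b >>> 4)))
    0xFF

-- ===== PRECONDITION & SPEC =====
-- Pre_ excludes the inputs on which A raises: ValueError for byte < 0, IndexError for byte > 255.
def Pre_affineTransformationMask (byte : Int) : Prop := 0 ≤ byte ∧ byte ≤ 255
instance (byte : Int) : Decidable (Pre_affineTransformationMask byte) := by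
  unfold Pre_affineTransformationMask; infer_instance
def pvWitness_affineTransformationMask : Int := (83)

def Spec_affineTransformationMask (byte : Int) (out : Int) : Prop := out = affineTransformationMask_alt byte
instance (byte : Int) (out : Int) : Decidable (Spec_affineTransformationMask byte out) := by unfold Spec_affineTransformationMask; infer_instance

-- ===== CLAIM (what is proved, stated in full; the proofs are below) =====
def Claim_equal_affineTransformationMask : Prop := ∀ (byte : Int), Dom_affineTransformationMask byte → Pre_affineTransformationMask byte → Spec_affineTransformationMask byte (affineTransformationMask byte)

-- ===== LEMMAS AND PROOFS =====
-- Finite check: A and B agree on every byte 0..255 (the whole of Pre_).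
set_option maxRecDepth 4096 in
theorem pvAgree : ∀ n ∈ Finset.range 256,
    affineTransformationMask (n : Int) = affineTransformationMask_alt (n : Int) := by decide

-- ===== VERDICT (by name: the statement is the Claim_ definition above) =====
theorem affineTransformationMask_spec : Claim_equal_affineTransformationMask := by
  intro byte _ hpre
  unfold Spec_affineTransformationMask
  have h1 : byte = ((byte.toNat : Nat) : Int) := (Int.toNat_of_nonneg hpre.1).symm
  have h2 : byte.toNat ∈ Finset.range 256 := by
    have := hpre.1; have := hpre.2
    simp only [Finset.mem_range]; omega
  rw [h1]; exact pvAgree byte.toNat h2
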